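-- pv_equiv track=rewrite | github.com/anthonytliu/cpuc_rag_mvp | src/agents/response_agents.py | _parse_search_results
-- ===== SOURCE A (Python) =====
-- from typing import Dict, List, Optional, Any
--
-- def _parse_search_results(results_string: str, query: str) -> List[Dict]:
--     """Parse DuckDuckGo search results string into structured data."""
--     parsed_results = []
--
--     # Split results by line and extract information
--     lines = results_string.split('\n')
--     current_result = {}
--
--     for line in lines:
--         line = line.strip()
--         if not line:
--             if current_result:
--                 current_result['query'] = query
--                 parsed_results.append(current_result)
--                 current_result = {}
--             continue
--
--         # Look for URL patterns
--         if line.startswith('http'):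
--             current_result['url'] = line
--         # Look for title patterns (usually the first non-URL line)
--         elif 'title' not in current_result and line:
--             current_result['title'] = line[:100]  # Truncate long titles
--         # Everything else is snippet/description
--         elif line and 'snippet' not in current_result:
--             current_result['snippet'] = line[:200]  # Truncate long snippets
--
--     # Add the last result if it exists
--     if current_result:
--         current_result['query'] = query
--         parsed_results.append(current_result)
--
--     return parsed_results
-- ===== SOURCE B (Python) =====
-- from typing import Dict, List
--
--
-- def _blocks(lines):
--     """Maximal runs of non-empty lines (lines are already stripped)."""
--     out = []
--     i, n = 0, len(lines)
--     while i < n: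
--         if lines[i] == '':
--             i += 1
--             continue
--         j = i + 1
--         while j < n and lines[j] != '':
--             j += 1
--         out.append(lines[i:j])
--         i = j
--     return out
--
--
-- def _parse_block(block, query):
--     """One result dict: url lines set 'url', the first other line is the
--     title, the second is the snippet."""
--     result = {}
--     for line in block:
--         if line.startswith('http'):
--             result['url'] = line
--         elif 'title' not in result:
--             result['title'] = line[:100]
--         elif 'snippet' not in result:
--             result['snippet'] = line[:200]
--     result['query'] = query
--     return result
--
--
-- def _parse_search_results(results_string: str, query: str) -> List[Dict]:
--     lines = [l.strip() for l in results_string.split('\n')]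
--     return [_parse_block(b, query) for b in _blocks(lines)]
-- ===== Notes on version B (the rewrite author's own statement) =====
-- stated objective: alternative
-- what changed: Replaced the single-pass state machine (one mutable current_result dict flushed whenever a blank line is seen, plus a trailing flush) by a two-phase decomposition: first split the stripped lines into maximal non-blank blocks with an index-based scanner, then map each block independently to its result dict.
import Mathlib
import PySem

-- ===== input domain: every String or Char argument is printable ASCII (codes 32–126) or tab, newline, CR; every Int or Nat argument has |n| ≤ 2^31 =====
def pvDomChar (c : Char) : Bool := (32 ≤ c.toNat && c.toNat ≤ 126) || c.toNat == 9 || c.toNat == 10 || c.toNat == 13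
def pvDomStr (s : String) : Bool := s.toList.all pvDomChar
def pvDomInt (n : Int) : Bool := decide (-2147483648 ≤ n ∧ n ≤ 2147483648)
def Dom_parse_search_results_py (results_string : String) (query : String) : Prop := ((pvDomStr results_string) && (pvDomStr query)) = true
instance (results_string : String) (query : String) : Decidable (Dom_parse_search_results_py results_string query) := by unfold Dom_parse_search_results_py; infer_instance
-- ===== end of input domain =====

-- B replaces A's single-pass flush-on-blank state machine by a two-phase
-- group-into-blocks / parse-each-block decomposition (objective: alternative,
-- same asymptotic cost).

-- ===== PORT A =====
def pvAStep (query : String) (st : List (PySem.Dict String String) × PySem.Dict String String)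
    (rawline : String) : List (PySem.Dict String String) × PySem.Dict String String :=
  let line := PySem.Str.strip rawline
  if line == "" then
    if st.2.size ≠ 0 then (st.1 ++ [st.2.insert "query" query], PySem.Dict.empty) else st
  else if PySem.Str.startswith line "http" then (st.1, st.2.insert "url" line)
  else if !st.2.contains "title" && line != "" then
    (st.1, st.2.insert "title" (PySem.Str.slice line none (some 100)))
  else if line != "" && !st.2.contains "snippet" then
    (st.1, st.2.insert "snippet" (PySem.Str.slice line none (some 200)))
  else st

def parse_search_results_py (results_string : String) (query : String) :
    List (List (String × String)) :=
  let lines := (PySem.Str.split? results_string "\n").getD []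
  let st := lines.foldl (pvAStep query) ([], PySem.Dict.empty)
  let parsed := if st.2.size ≠ 0 then st.1 ++ [st.2.insert "query" query] else st.1
  parsed.map (fun d => d.items)

-- ===== PORT B =====
def pvBlocks : List String → List (List String)
  | [] => []
  | l :: ls =>
    if l = "" then pvBlocks ls
    else (l :: ls.takeWhile (fun x => x ≠ "")) :: pvBlocks (ls.dropWhile (fun x => x ≠ ""))
termination_by ls => ls.length
decreasing_by
  all_goals simp only [List.length_cons]
  · omega
  · exact Nat.lt_succ_of_le (List.length_dropWhile_le _ _)

def pvBStep (d : PySem.Dict String String) (line : String) : PySem.Dict String String :=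
  if PySem.Str.startswith line "http" then d.insert "url" line
  else if !d.contains "title" then d.insert "title" (PySem.Str.slice line none (some 100))
  else if !d.contains "snippet" then d.insert "snippet" (PySem.Str.slice line none (some 200))
  else d

def pvParseBlock (block : List String) (query : String) : List (String × String) :=
  ((block.foldl pvBStep PySem.Dict.empty).insert "query" query).items

def parse_search_results_py_alt (results_string : String) (query : String) :
    List (List (String × String)) :=
  let lines := ((PySem.Str.split? results_string "\n").getD []).map PySem.Str.strip
  (pvBlocks lines).map (fun b => pvParseBlock b query)

-- ===== PRECONDITION & SPEC =====
def Spec_parse_search_results_py (results_string : String) (query : String) (out : List (List (String × String))) : Prop := out = parse_search_results_py_alt results_string query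
instance (results_string : String) (query : String) (out : List (List (String × String))) : Decidable (Spec_parse_search_results_py results_string query out) := by unfold Spec_parse_search_results_py; infer_instance

-- ===== CLAIM (what is proved, stated in full; the proofs are below) =====
def Claim_equal_parse_search_results_py : Prop := ∀ (results_string : String) (query : String), Dom_parse_search_results_py results_string query → Spec_parse_search_results_py results_string query (parse_search_results_py results_string query)

-- ===== LEMMAS AND PROOFS =====

def pvScan (b : List String) : PySem.Dict String String := b.foldl pvBStep PySem.Dict.empty

-- A's grouping with a pending (already stripped, non-blank) prefix p
def pvG : List String → List String → List (List String)
  | p, [] => if p = [] then [] else [p]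
  | p, l :: ls =>
    if PySem.Str.strip l = "" then (if p = [] then pvG [] ls else p :: pvG [] ls)
    else pvG (p ++ [PySem.Str.strip l]) ls

lemma pvG_spec (ls : List String) : ∀ p : List String,
    (p ≠ [] → pvG p ls =
      (p ++ (ls.map PySem.Str.strip).takeWhile (fun x => x ≠ "")) ::
        pvBlocks ((ls.map PySem.Str.strip).dropWhile (fun x => x ≠ ""))) ∧
    pvG [] ls = pvBlocks (ls.map PySem.Str.strip) := by
  induction ls with
  | nil =>
    intro p
    refine ⟨fun hp => ?_, by simp [pvG, pvBlocks]⟩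
    simp [pvG, hp, pvBlocks]
  | cons l ls ih =>
    intro p
    by_cases hsl : PySem.Str.strip l = ""
    · constructor
      · intro hp
        simp only [pvG, hsl, if_pos, if_neg hp, List.map_cons,
          List.takeWhile_cons, List.dropWhile_cons]
        rw [(ih []).2]
        simp [pvBlocks]
      · simp only [pvG, hsl, if_pos]
        rw [(ih []).2]
        simp [pvBlocks, hsl]
    · constructor
      · intro hp
        simp only [pvG, hsl, List.map_cons, List.takeWhile_cons, List.dropWhile_cons]
        rw [(ih (p ++ [PySem.Str.strip l])).1 (by simp)]
        simp [hsl]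
      · simp only [pvG, hsl, List.map_cons]
        rw [(ih ([] ++ [PySem.Str.strip l])).1 (by simp)]
        simp only [List.nil_append]
        rw [pvBlocks]
        simp [hsl]

lemma pvBStep_contains_mono (d : PySem.Dict String String) (s k : String)
    (h : d.contains k = true) : (pvBStep d s).contains k = true := by
  unfold pvBStep
  split_ifs <;> simp [PySem.Dict.contains_insert, h]

lemma pvScan_size_ne (p : List String) (hp0 : p ≠ []) : (pvScan p).size ≠ 0 := by
  rcases p with _ | ⟨x, xs⟩
  · exact absurd rfl hp0
  have hkey : ∃ k, (pvBStep PySem.Dict.empty x).contains k = true := by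
    unfold pvBStep
    split_ifs with h1 h2 h3
    · exact ⟨"url", PySem.Dict.contains_insert_self _ _ _⟩
    · exact ⟨"title", PySem.Dict.contains_insert_self _ _ _⟩
    · exact ⟨"snippet", PySem.Dict.contains_insert_self _ _ _⟩
    · exact absurd (by simp : (!PySem.Dict.empty.contains "title") = true) h2
  obtain ⟨k, hk⟩ := hkey
  have hfold : ∀ (l : List String) (d : PySem.Dict String String),
      d.contains k = true → (l.foldl pvBStep d).contains k = true := by
    intro l
    induction l with
    | nil => intro d hd; simpa using hd
    | cons y ys ih => intro d hd; exact ih _ (pvBStep_contains_mono d y k hd)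
  have hc : (pvScan (x :: xs)).contains k = true := by
    simpa [pvScan, List.foldl_cons] using hfold xs (pvBStep PySem.Dict.empty x) hk
  intro hsz
  have hitems : (pvScan (x :: xs)).items = [] := List.length_eq_zero_iff.mp hsz
  rw [PySem.Dict.contains_eq_decide_mem_keys] at hc
  have : k ∈ (pvScan (x :: xs)).items.map Prod.fst := by
    simpa [PySem.Dict.keys] using of_decide_eq_true hc
  rw [hitems] at this
  simp at this

lemma pvFold_spec (q : String) (ls : List String) : ∀ (acc : List (PySem.Dict String String))
    (p : List String), p ≠ [] ∨ p = [] →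
    (if ((ls.foldl (pvAStep q) (acc, pvScan p)).2).size ≠ 0 then
        (ls.foldl (pvAStep q) (acc, pvScan p)).1 ++
          [((ls.foldl (pvAStep q) (acc, pvScan p)).2).insert "query" q]
      else (ls.foldl (pvAStep q) (acc, pvScan p)).1) =
    acc ++ (pvG p ls).map (fun b => (pvScan b).insert "query" q) := by
  induction ls with
  | nil =>
    intro acc p _
    simp only [List.foldl_nil]
    by_cases hp0 : p = []
    · subst hp0
      rw [pvG]
      have hsize : (pvScan ([] : List String)).size = 0 := rfl
      simp [hsize]
    · rw [if_pos (pvScan_size_ne p hp0), pvG, if_neg hp0]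
      simp
  | cons l ls ih =>
    intro acc p _
    rw [List.foldl_cons]
    by_cases hsl : PySem.Str.strip l = ""
    · by_cases hp0 : p = []
      · subst hp0
        have hsize : (pvScan ([] : List String)).size = 0 := rfl
        have hstep : pvAStep q (acc, pvScan []) l = (acc, pvScan []) := by
          unfold pvAStep; simp [hsl, hsize]
        rw [hstep, ih acc [] (Or.inr rfl), pvG]
        simp [hsl]
      · have hstep : pvAStep q (acc, pvScan p) l
            = (acc ++ [(pvScan p).insert "query" q], pvScan []) := by
          unfold pvAStep; simp [hsl, pvScan_size_ne p hp0]; rfl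
        rw [hstep, ih (acc ++ [(pvScan p).insert "query" q]) [] (Or.inr rfl), pvG, if_pos hsl,
          if_neg hp0]
        simp
    · have hstep : pvAStep q (acc, pvScan p) l = (acc, pvScan (p ++ [PySem.Str.strip l])) := by
        have : pvScan (p ++ [PySem.Str.strip l]) = pvBStep (pvScan p) (PySem.Str.strip l) := by
          simp [pvScan, List.foldl_append]
        rw [this]
        unfold pvAStep pvBStep
        simp [hsl]
        split_ifs <;> rfl
      rw [hstep, ih acc (p ++ [PySem.Str.strip l]) (Or.inl (by simp)), pvG, if_neg hsl]

-- ===== VERDICT (by name: the statement is the Claim_ definition above) =====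
theorem parse_search_results_py_spec : Claim_equal_parse_search_results_py := by
  intro rs q _
  unfold Spec_parse_search_results_py parse_search_results_py parse_search_results_py_alt
  have h := pvFold_spec q ((PySem.Str.split? rs "\n").getD []) [] [] (Or.inr rfl)
  simp only [pvScan, List.foldl_nil] at h
  simp only [h, (pvG_spec ((PySem.Str.split? rs "\n").getD []) []).2, List.nil_append,
    List.map_map]
  rfl
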